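-- pv_equiv track=rewrite | github.com/quynhai136/CK_chinh-xac | ck 1-5.py | question_26
-- ===== SOURCE A (Python) =====
-- import collections
-- import collections
-- import collections
--
-- def question_26(s: str) -> int:
--     char_count = collections.Counter(s)
--     length = 0
--     odd_found = False
--     for count in char_count.values():
--         length += (count // 2 )* 2
--         if count % 2 == 1:
--             odd_found = True
--     if odd_found:
--         length += 1
--     return length
-- ===== SOURCE B (Python) =====
-- def question_26(s: str) -> int:
--     unpaired = set()
--     for ch in s:
--         if ch in unpaired:
--             unpaired.discard(ch)
--         else:
--             unpaired.add(ch)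
--     return len(s) - len(unpaired) + (1 if unpaired else 0)
-- ===== Notes on version B (the rewrite author's own statement) =====
-- stated objective: alternative
-- what changed: B drops the Counter entirely: it maintains a toggle set of currently-unpaired characters in one pass (membership toggled per character) and returns len(s) - len(unpaired) + (1 if unpaired else 0).
import Mathlib
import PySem

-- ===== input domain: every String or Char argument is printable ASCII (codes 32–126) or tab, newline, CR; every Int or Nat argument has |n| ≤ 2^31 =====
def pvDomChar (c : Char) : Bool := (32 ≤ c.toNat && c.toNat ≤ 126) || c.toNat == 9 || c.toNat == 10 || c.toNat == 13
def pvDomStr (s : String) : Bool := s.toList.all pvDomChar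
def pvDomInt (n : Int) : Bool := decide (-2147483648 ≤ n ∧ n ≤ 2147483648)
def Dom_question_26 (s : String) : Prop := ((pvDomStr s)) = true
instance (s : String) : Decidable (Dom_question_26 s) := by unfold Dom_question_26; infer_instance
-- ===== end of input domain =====

-- B replaces A's Counter pass by a single toggle-set pass (set of currently-unpaired characters)
-- and the closed form len(s) - len(unpaired) + (1 if unpaired else 0); objective: alternative.
-- ===== PORT A =====
def question_26 (s : String) : Int :=
  let char_count := PySem.Dict.counter s.toList
  let p := char_count.values.foldl
    (fun st count =>
      (st.1 + PySem.Int.floordiv count 2 * 2,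
       if PySem.Int.mod count 2 = 1 then true else st.2))
    ((0 : Int), false)
  if p.2 then p.1 + 1 else p.1

-- ===== PORT B =====
def question_26_alt (s : String) : Int :=
  let unpaired : PySem.Set Char := s.toList.foldl
    (fun u ch => if PySem.Set.contains u ch then PySem.Set.discard u ch else PySem.Set.add u ch)
    PySem.Set.empty
  (PySem.Str.len s : Int) - (unpaired.length : Int) + (if unpaired ≠ [] then 1 else 0)

-- ===== PRECONDITION & SPEC =====
def Spec_question_26 (s : String) (out : Int) : Prop := out = question_26_alt s
instance (s : String) (out : Int) : Decidable (Spec_question_26 s out) := by unfold Spec_question_26; infer_instance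

-- ===== CLAIM (what is proved, stated in full; the proofs are below) =====
def Claim_equal_question_26 : Prop := ∀ (s : String), Dom_question_26 s → Spec_question_26 s (question_26 s)

-- ===== LEMMAS AND PROOFS =====

-- each Python count % 2 is 0 or 1
lemma mod2_cases (c : Int) : PySem.Int.mod c 2 = 0 ∨ PySem.Int.mod c 2 = 1 := by
  have h1 := PySem.Int.mod_nonneg c (b := 2) (by omega)
  have h2 := PySem.Int.mod_lt c (b := 2) (by omega)
  omega

-- A's loop computes (Σv - Σ(v%2), "some v%2 = 1") over the values list
lemma foldA (vs : List Int) (a : Int) (b : Bool) :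
    vs.foldl (fun st count =>
      (st.1 + PySem.Int.floordiv count 2 * 2,
       if PySem.Int.mod count 2 = 1 then true else st.2)) (a, b)
    = (a + vs.sum - (vs.map (fun v => PySem.Int.mod v 2)).sum,
       b || vs.any (fun v => decide (PySem.Int.mod v 2 = 1))) := by
  induction vs generalizing a b with
  | nil => simp
  | cons c t ih =>
    simp only [List.foldl_cons, ih, List.sum_cons, List.map_cons, List.any_cons, Prod.mk.injEq]
    have hdm := PySem.Int.floordiv_mul_add_mod c 2
    constructor
    · omega
    · rcases mod2_cases c with h | h <;> rw [h] <;> cases b <;> simp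

-- the odd-count sum is 0 iff no value is odd
lemma sum_mod2_zero_iff (vs : List Int) :
    (vs.map (fun v => PySem.Int.mod v 2)).sum = 0 ↔
      vs.any (fun v => decide (PySem.Int.mod v 2 = 1)) = false := by
  induction vs with
  | nil => simp
  | cons c t ih =>
    simp only [List.map_cons, List.sum_cons, List.any_cons, Bool.or_eq_false_iff]
    have hnn : 0 ≤ (t.map (fun v => PySem.Int.mod v 2)).sum := by
      apply List.sum_nonneg; intro x hx
      simp only [List.mem_map] at hx
      obtain ⟨v, _, rfl⟩ := hx
      exact PySem.Int.mod_nonneg v (by omega)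
    rcases mod2_cases c with h | h
    · rw [h]; simpa using ih
    · rw [h]
      constructor
      · intro h0; exfalso; omega
      · intro hr; exact absurd hr.1 (by simp)

-- the values of Counter(s) sum to len(s)
lemma sum_values_counter (cs : List Char) :
    (PySem.Dict.counter cs).values.sum = (cs.length : Int) := by
  have hperm : (PySem.Set.ofList cs).Perm cs.dedup := by
    refine (List.perm_ext_iff_of_nodup (PySem.Set.nodup_ofList cs) cs.nodup_dedup).2 ?_
    intro x; rw [PySem.Set.mem_ofList, List.mem_dedup]
  have hvals : (PySem.Dict.counter cs).values
      = (PySem.Set.ofList cs).map (fun k => (cs.count k : Int)) := by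
    simp [PySem.Dict.values, PySem.Dict.items_counter, Function.comp]
  rw [hvals, List.Perm.sum_eq (hperm.map _),
      ← List.sum_map_count_dedup_eq_length cs, Nat.cast_list_sum, List.map_map]
  rfl

-- B's toggle loop: the result is nodup and holds exactly the start-XOR-odd-count characters
lemma toggle_invariant (cs : List Char) (u : List Char) (hu : u.Nodup) :
    (cs.foldl (fun u ch =>
        if PySem.Set.contains u ch then PySem.Set.discard u ch else PySem.Set.add u ch) u).Nodup ∧
    ∀ x, (x ∈ cs.foldl (fun u ch =>
        if PySem.Set.contains u ch then PySem.Set.discard u ch else PySem.Set.add u ch) u ↔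
      (x ∈ u ↔ cs.count x % 2 = 0)) := by
  induction cs generalizing u with
  | nil => exact ⟨hu, by simp⟩
  | cons c t ih =>
    simp only [List.foldl_cons]
    by_cases hc : c ∈ u
    · rw [if_pos ((PySem.Set.contains_iff u c).2 hc)]
      obtain ⟨hn, hm⟩ := ih _ (PySem.Set.nodup_discard u c hu)
      refine ⟨hn, fun x => ?_⟩
      rw [hm x, PySem.Set.mem_discard]
      by_cases hx : x = c
      · subst hx
        rcases Nat.mod_two_eq_zero_or_one (t.count x) with h | h <;>
          simp [List.count_cons_self, Nat.add_mod, h, hc]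
      · simp [hx, Ne.symm hx]
    · rw [if_neg (fun h => hc ((PySem.Set.contains_iff u c).1 h))]
      obtain ⟨hn, hm⟩ := ih _ (PySem.Set.nodup_add u c hu)
      refine ⟨hn, fun x => ?_⟩
      rw [hm x, PySem.Set.mem_add]
      by_cases hx : x = c
      · subst hx
        rcases Nat.mod_two_eq_zero_or_one (t.count x) with h | h <;>
          simp [List.count_cons_self, Nat.add_mod, h, hc]
      · simp [hx, Ne.symm hx]

-- a sum of 0/1 residues is the count of odd entries
lemma sum_mod2_eq_countP (cs : List Char) (l : List Char) :
    (l.map (fun k => cs.count k % 2)).sum = l.countP (fun k => cs.count k % 2 == 1) := by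
  induction l with
  | nil => simp
  | cons a t ih =>
    rcases Nat.mod_two_eq_zero_or_one (cs.count a) with h | h <;>
      simp [h, ih] <;> omega

-- B's unpaired set has as many elements as there are odd-count characters
lemma length_toggle (cs : List Char) :
    ((cs.foldl (fun u ch =>
        if PySem.Set.contains u ch then PySem.Set.discard u ch else PySem.Set.add u ch)
        PySem.Set.empty).length : Int)
    = ((PySem.Set.ofList cs).map (fun k => PySem.Int.mod (cs.count k : Int) 2)).sum := by
  obtain ⟨hn, hm⟩ := toggle_invariant cs [] List.nodup_nil
  set R := cs.foldl (fun u ch =>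
      if PySem.Set.contains u ch then PySem.Set.discard u ch else PySem.Set.add u ch) [] with hR
  have hmem : ∀ x, x ∈ R ↔ cs.count x % 2 = 1 := by
    intro x
    rw [hm x]
    rcases Nat.mod_two_eq_zero_or_one (cs.count x) with h | h <;> simp [h]
  have hperm : R.Perm ((PySem.Set.ofList cs).filter (fun k => cs.count k % 2 == 1)) := by
    refine (List.perm_ext_iff_of_nodup hn ((PySem.Set.nodup_ofList cs).filter _)).2 ?_
    intro x
    rw [hmem x, List.mem_filter, PySem.Set.mem_ofList]
    constructor
    · intro h
      refine ⟨?_, by simp [h]⟩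
      have : 0 < cs.count x := by omega
      exact List.count_pos_iff.1 this
    · intro ⟨_, h⟩; simpa using h
  have hlen : R.length = (PySem.Set.ofList cs).countP (fun k => cs.count k % 2 == 1) := by
    rw [hperm.length_eq, List.countP_eq_length_filter]
  have hcast : ∀ k, PySem.Int.mod (cs.count k : Int) 2 = ((cs.count k % 2 : Nat) : Int) := by
    intro k; exact_mod_cast PySem.Int.mod_natCast (cs.count k) 2
  calc ((R.length : Nat) : Int)
      = (((PySem.Set.ofList cs).map (fun k => cs.count k % 2)).sum : Int) := by
        rw [hlen, sum_mod2_eq_countP]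
    _ = ((PySem.Set.ofList cs).map (fun k => PySem.Int.mod (cs.count k : Int) 2)).sum := by
        rw [Nat.cast_list_sum, List.map_map]
        exact congrArg List.sum (List.map_congr_left fun k _ => by
          simp only [Function.comp_apply, hcast k])

theorem question_26_spec : Claim_equal_question_26 := by
  intro s _
  unfold Spec_question_26 question_26 question_26_alt
  have hvals : (PySem.Dict.counter s.toList).values
      = (PySem.Set.ofList s.toList).map (fun k => (s.toList.count k : Int)) := by
    simp [PySem.Dict.values, PySem.Dict.items_counter, Function.comp]
  simp only [foldA, Bool.false_or, PySem.Str.len_eq, sum_values_counter]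
  set R := s.toList.foldl (fun u ch =>
      if PySem.Set.contains u ch then PySem.Set.discard u ch else PySem.Set.add u ch)
      PySem.Set.empty with hRdef
  have hk : ((PySem.Dict.counter s.toList).values.map (fun v => PySem.Int.mod v 2)).sum
      = (R.length : Int) := by
    rw [hvals, List.map_map, length_toggle]
    rfl
  by_cases h : ((PySem.Dict.counter s.toList).values.any
      (fun v => decide (PySem.Int.mod v 2 = 1))) = true
  · have hk0 : (R.length : Int) ≠ 0 := by
      intro h0
      rw [← hk] at h0
      rw [(sum_mod2_zero_iff _).1 h0] at h
      exact Bool.false_ne_true h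
    have hR : R ≠ [] := by
      intro hnil; apply hk0; rw [hnil]; rfl
    rw [h, if_pos rfl, if_pos hR, hk]
    ring
  · rw [Bool.not_eq_true] at h
    have hk0 : ((PySem.Dict.counter s.toList).values.map (fun v => PySem.Int.mod v 2)).sum = 0 :=
      (sum_mod2_zero_iff _).2 h
    have hR : R = [] := by
      have h1 : (R.length : Int) = 0 := by rw [← hk]; exact hk0
      exact List.length_eq_zero_iff.1 (by exact_mod_cast h1)
    rw [h, hR, hk0]
    simp
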